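-- pv_equiv track=rewrite | github.com/jimmyjdejesus-cmyk/Jarvis_AI | agent/doc_generator.py | _extract_jsdoc
-- ===== SOURCE A (Python) =====
-- from typing import List, Dict, Any, Optional
--
-- def _extract_jsdoc(lines: List[str]) -> str:
--     """Extract JSDoc comment from lines."""
--     doc_lines = []
--     in_doc = False
--
--     for line in reversed(lines[-10:]):  # Look at last 10 lines
--         stripped = line.strip()
--         if stripped.endswith('*/'):
--             in_doc = True
--             doc_lines.append(stripped)
--         elif in_doc:
--             doc_lines.append(stripped)
--             if stripped.startswith('/**'):
--                 break
--         elif stripped and not stripped.startswith('//'):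
--             break
--
--     if doc_lines:
--         doc_lines.reverse()
--         return '\n'.join(doc_lines)
--     return ""
-- ===== SOURCE B (Python) =====
-- def _extract_jsdoc(lines):
--     """Extract JSDoc comment from lines."""
--     strip = [l.strip() for l in lines[-10:]]
--     # phase 1: find the index i of the doc-block end, scanning from the bottom
--     # over trailing blank or '//' lines (a line ending '*/' always counts as the end)
--     i = len(strip) - 1
--     while i >= 0 and not strip[i].endswith('*/') and (strip[i] == '' or strip[i].startswith('//')):
--         i -= 1
--     if i < 0 or not strip[i].endswith('*/'):
--         return ''
--     # phase 2: find the index j of the doc-block start: nearest line above i that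
--     # opens with '/**' without closing on the same line; default to the window start
--     j = i - 1
--     while j >= 0 and not (strip[j].startswith('/**') and not strip[j].endswith('*/')):
--         j -= 1
--     j = max(j, 0)
--     return '\n'.join(strip[j:i + 1])
-- ===== Notes on version B (the rewrite author's own statement) =====
-- stated objective: alternative
-- what changed: Replaces A's single backward scan with a mutable in_doc flag and accumulator list by a flagless two-phase index computation on a pre-stripped window: locate the block-end index i, then the block-start index j, and return one slice join strip[j:i+1].
import Mathlib
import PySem

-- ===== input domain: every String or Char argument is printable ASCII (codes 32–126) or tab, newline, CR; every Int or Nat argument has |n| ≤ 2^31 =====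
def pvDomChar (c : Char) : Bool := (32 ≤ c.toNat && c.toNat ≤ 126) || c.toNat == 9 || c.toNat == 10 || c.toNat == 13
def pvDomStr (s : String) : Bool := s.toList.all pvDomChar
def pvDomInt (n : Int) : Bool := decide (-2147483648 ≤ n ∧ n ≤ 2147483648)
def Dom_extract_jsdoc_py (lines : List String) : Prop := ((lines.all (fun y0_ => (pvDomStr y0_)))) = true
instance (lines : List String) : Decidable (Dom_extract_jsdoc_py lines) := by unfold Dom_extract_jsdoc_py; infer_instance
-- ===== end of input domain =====

-- B replaces A's backward scan with an in_doc flag and accumulator by a flagless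
-- two-phase index computation (end index i, start index j) and one slice join
-- (objective: alternative decomposition; same cost).

-- ===== PORT A =====
-- A's loop over reversed(lines[-10:]): doc_lines accumulator (Python append = ++ [s]), in_doc flag.
def extractJsdocALoop (ls : List String) (acc : List String) (inDoc : Bool) : List String :=
  match ls with
  | [] => acc
  | l :: rest =>
    let s := PySem.Str.strip l
    if PySem.Str.endswith s "*/" then
      extractJsdocALoop rest (acc ++ [s]) true
    else if inDoc then
      if PySem.Str.startswith s "/**" then acc ++ [s]
      else extractJsdocALoop rest (acc ++ [s]) inDoc
    else if s != "" && !(PySem.Str.startswith s "//") then acc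
    else extractJsdocALoop rest acc inDoc

def extract_jsdoc_py (lines : List String) : String :=
  let window := PySem.List.slice lines (some (-10)) none
  let docLines := extractJsdocALoop window.reverse [] false
  if docLines ≠ [] then PySem.Str.join "\n" docLines.reverse else ""

-- ===== PORT B =====
-- B's phase-1 while loop: i counts down from len-1; argument k stands for i+1 (k = 0 ↔ i = -1).
def extractJsdocPhase1 (st : List String) : Nat → Option Nat
  | 0 => none
  | k + 1 =>
    let s := st.getD k ""
    if !(PySem.Str.endswith s "*/") && (s == "" || PySem.Str.startswith s "//") then
      extractJsdocPhase1 st k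
    else some k

-- B's phase-2 while loop: j counts down from i-1; result 0 when no opener found (= max(j, 0)).
def extractJsdocPhase2 (st : List String) : Nat → Nat
  | 0 => 0
  | k + 1 =>
    let s := st.getD k ""
    if PySem.Str.startswith s "/**" && !(PySem.Str.endswith s "*/") then k
    else extractJsdocPhase2 st k

def extract_jsdoc_py_alt (lines : List String) : String :=
  let st := (PySem.List.slice lines (some (-10)) none).map PySem.Str.strip
  match extractJsdocPhase1 st st.length with
  | none => ""
  | some i =>
    if !(PySem.Str.endswith (st.getD i "") "*/") then ""
    else
      let j := extractJsdocPhase2 st i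
      PySem.Str.join "\n" (PySem.List.slice st (some (j : Int)) (some ((i : Int) + 1)))

-- ===== PRECONDITION & SPEC =====
def Spec_extract_jsdoc_py (lines : List String) (out : String) : Prop := out = extract_jsdoc_py_alt lines
instance (lines : List String) (out : String) : Decidable (Spec_extract_jsdoc_py lines out) := by unfold Spec_extract_jsdoc_py; infer_instance

-- ===== CLAIM (what is proved, stated in full; the proofs are below) =====
def Claim_equal_extract_jsdoc_py : Prop := ∀ (lines : List String), Dom_extract_jsdoc_py lines → Spec_extract_jsdoc_py lines (extract_jsdoc_py lines)


-- ===== LEMMAS AND PROOFS =====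

-- Common specification on the stripped window in reversed order:
-- jsdocSpec skips trailing noise and finds the block end; jsdocCollect gathers up to the opener.
def jsdocCollect : List String → List String
  | [] => []
  | s :: rest =>
    s :: (if PySem.Str.startswith s "/**" && !(PySem.Str.endswith s "*/") then [] else jsdocCollect rest)

def jsdocSpec : List String → List String
  | [] => []
  | s :: rest =>
    if PySem.Str.endswith s "*/" then s :: jsdocCollect rest
    else if s == "" || PySem.Str.startswith s "//" then jsdocSpec rest
    else []

theorem aLoop_true (ls : List String) : ∀ acc,
    extractJsdocALoop ls acc true = acc ++ jsdocCollect (ls.map PySem.Str.strip) := by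
  induction ls with
  | nil => intro acc; simp [extractJsdocALoop, jsdocCollect]
  | cons l rest ih =>
    intro acc
    simp only [extractJsdocALoop, List.map_cons, jsdocCollect]
    cases hE : PySem.Str.endswith (PySem.Str.strip l) "*/" <;>
      cases hS : PySem.Str.startswith (PySem.Str.strip l) "/**" <;>
        simp [hE, hS, ih]

theorem aLoop_false (ls : List String) : ∀ acc,
    extractJsdocALoop ls acc false = acc ++ jsdocSpec (ls.map PySem.Str.strip) := by
  induction ls with
  | nil => intro acc; simp [extractJsdocALoop, jsdocSpec]
  | cons l rest ih =>
    intro acc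
    simp only [extractJsdocALoop, List.map_cons, jsdocSpec]
    cases hE : PySem.Str.endswith (PySem.Str.strip l) "*/" <;>
      cases hZ : PySem.Str.strip l == "" <;>
        cases hS : PySem.Str.startswith (PySem.Str.strip l) "//" <;>
          simp_all [ih, aLoop_true]

theorem join_nil_str : PySem.Str.join "\n" ([] : List String) = "" := by rfl

-- A's result is the joined reverse of jsdocSpec on the reversed stripped window.
theorem a_eq_spec (lines : List String) :
    extract_jsdoc_py lines =
      PySem.Str.join "\n"
        (jsdocSpec (((PySem.List.slice lines (some (-10)) none).map PySem.Str.strip).reverse)).reverse := by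
  unfold extract_jsdoc_py
  dsimp only
  rw [aLoop_false, ← List.map_reverse]
  simp only [List.nil_append]
  by_cases h : jsdocSpec (((PySem.List.slice lines (some (-10)) none).map PySem.Str.strip).reverse) = []
  · simp [h, join_nil_str]
  · simp [h]

theorem phase2_le (st : List String) : ∀ k, extractJsdocPhase2 st k ≤ k := by
  intro k
  induction k with
  | zero => simp [extractJsdocPhase2]
  | succ k ih =>
    simp only [extractJsdocPhase2]
    split
    · omega
    · omega

theorem phase1_lt (st : List String) : ∀ k i, extractJsdocPhase1 st k = some i → i < k := by
  intro k
  induction k with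
  | zero => intro i h; simp [extractJsdocPhase1] at h
  | succ k ih =>
    intro i h
    simp only [extractJsdocPhase1] at h
    split at h
    · have := ih i h; omega
    · simp at h; omega

theorem take_succ_getD (st : List String) (k : Nat) (hk : k < st.length) :
    st.take (k + 1) = st.take k ++ [st.getD k ""] := by
  rw [List.take_add_one]
  simp [List.getElem?_eq_getElem hk, List.getD_eq_getElem?_getD]

theorem take_succ_reverse (st : List String) (k : Nat) (hk : k < st.length) :
    (st.take (k + 1)).reverse = st.getD k "" :: (st.take k).reverse := by
  rw [take_succ_getD st k hk]; simp

theorem collect_eq (st : List String) : ∀ k, k ≤ st.length →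
    jsdocCollect ((st.take k).reverse) = ((st.take k).drop (extractJsdocPhase2 st k)).reverse := by
  intro k
  induction k with
  | zero => intro _; simp [jsdocCollect, extractJsdocPhase2]
  | succ k ih =>
    intro hk
    have hklt : k < st.length := by omega
    have hj := phase2_le st k
    rw [take_succ_reverse st k hklt]
    simp only [jsdocCollect, extractJsdocPhase2]
    cases hC : (PySem.Str.startswith (st.getD k "") "/**" && !(PySem.Str.endswith (st.getD k "") "*/"))
    · rw [take_succ_getD st k hklt, List.drop_append_of_le_length (by simp; omega)]
      simp [ih (by omega)]
    · rw [take_succ_getD st k hklt, List.drop_append_of_le_length (by simp; omega)]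
      simp

theorem spec_eq (st : List String) : ∀ k, k ≤ st.length →
    jsdocSpec ((st.take k).reverse) =
      (match extractJsdocPhase1 st k with
      | none => []
      | some i =>
        if PySem.Str.endswith (st.getD i "") "*/" then
          st.getD i "" :: jsdocCollect ((st.take i).reverse)
        else []) := by
  intro k
  induction k with
  | zero => intro _; simp [jsdocSpec, extractJsdocPhase1]
  | succ k ih =>
    intro hk
    have hklt : k < st.length := by omega
    rw [take_succ_reverse st k hklt]
    simp only [jsdocSpec, extractJsdocPhase1]
    cases hE : PySem.Str.endswith (st.getD k "") "*/" <;>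
      cases hZ : st.getD k "" == "" <;>
        cases hS : PySem.Str.startswith (st.getD k "") "//" <;>
          simp_all [ih (by omega : k ≤ st.length)]

-- B's core computation (the body of extract_jsdoc_py_alt) equals A's specification.
theorem b_core (st : List String) :
    (match extractJsdocPhase1 st st.length with
     | none => ""
     | some i =>
       if !(PySem.Str.endswith (st.getD i "") "*/") then ""
       else
         PySem.Str.join "\n"
           (PySem.List.slice st (some ((extractJsdocPhase2 st i : Nat) : Int)) (some ((i : Int) + 1)))) =
    PySem.Str.join "\n" (jsdocSpec st.reverse).reverse := by
  have h := spec_eq st st.length (le_refl _)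
  rw [List.take_length] at h
  rw [h]
  cases h1 : extractJsdocPhase1 st st.length with
  | none => rfl
  | some i =>
    have hi : i < st.length := phase1_lt st _ _ h1
    have hj := phase2_le st i
    cases hE : PySem.Str.endswith (st.getD i "") "*/"
    · simp at hE
      simp [hE, join_nil_str]
    · simp only [hE, Bool.not_true, Bool.false_eq_true, if_false, if_true, List.reverse_cons]
      have hcast : ((i : Int) + 1) = ((i + 1 : Nat) : Int) := by push_cast; ring
      rw [hcast, PySem.List.slice_natCast, collect_eq st i (by omega)]
      congr 1
      rw [← List.drop_take, take_succ_getD st i hi,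
        List.drop_append_of_le_length (by simp; omega)]
      simp

-- ===== VERDICT (by name: the statement is the Claim_ definition above) =====
theorem extract_jsdoc_py_spec : Claim_equal_extract_jsdoc_py := by
  intro lines _
  unfold Spec_extract_jsdoc_py
  rw [a_eq_spec]
  unfold extract_jsdoc_py_alt
  dsimp only
  exact (b_core _).symm
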